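-- pv_equiv track=rewrite | github.com/niels-devs/warehouse-optimization | src/utils.py | get_picker_locations_from_ifloc
-- ===== SOURCE A (Python) =====
-- from typing import List, Dict, Set
--
-- def get_picker_locations_from_ifloc(
--     batches: Dict[int, List[int]],
--     if_loc_in_ord: Dict[tuple, int],
--     nb_locations: int
-- ) -> Dict[int, List[int]]:
--     """
--     Convert batches of orders into actual locations for each picker.
--
--     Args:
--         batches: dictionary {picker_id: list of orders}
--         if_loc_in_ord: dictionary {(location, order): 1 if order requires location else 0}
--         nb_locations: total number of locations
--
--     Returns:
--         picker_locations: dictionary {picker_id: sorted list of locations}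
--                           Only pickers with at least one location are returned.
--     """
--     picker_locations = {}
--
--     for picker, orders in batches.items():
--         locations = set()
--
--         for loc in range(nb_locations):
--             # Check if any of this picker's orders require this location
--             if any(if_loc_in_ord.get((loc, order_number), 0) == 1 for order_number in orders):
--                 locations.add(loc)
--
--         # Only add pickers that actually have locations
--         if locations:
--             picker_locations[picker] = sorted(locations)
--
--     return picker_locations
-- ===== SOURCE B (Python) =====
-- def get_picker_locations_from_ifloc(batches, if_loc_in_ord, nb_locations):
--     # Build the order -> set-of-locations index once, then union per picker.
--     order_to_locs = {}
--     for (loc, order), v in if_loc_in_ord.items():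
--         if v == 1 and 0 <= loc < nb_locations:
--             order_to_locs.setdefault(order, set()).add(loc)
--     picker_locations = {}
--     for picker, orders in batches.items():
--         locs = set()
--         for o in orders:
--             locs |= order_to_locs.get(o, set())
--         if locs:
--             picker_locations[picker] = sorted(locs)
--     return picker_locations
-- ===== Notes on version B (the rewrite author's own statement) =====
-- stated objective: alternative
-- what changed: Instead of scanning every location in range(nb_locations) and probing every order of the picker via dict.get (A), B precomputes an order-to-locations index from if_loc_in_ord in one pass and unions the indexed sets per picker before sorting; Pre_ only excludes association lists with duplicate (location, order) keys, which do not represent any Python dict.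
import Mathlib
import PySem

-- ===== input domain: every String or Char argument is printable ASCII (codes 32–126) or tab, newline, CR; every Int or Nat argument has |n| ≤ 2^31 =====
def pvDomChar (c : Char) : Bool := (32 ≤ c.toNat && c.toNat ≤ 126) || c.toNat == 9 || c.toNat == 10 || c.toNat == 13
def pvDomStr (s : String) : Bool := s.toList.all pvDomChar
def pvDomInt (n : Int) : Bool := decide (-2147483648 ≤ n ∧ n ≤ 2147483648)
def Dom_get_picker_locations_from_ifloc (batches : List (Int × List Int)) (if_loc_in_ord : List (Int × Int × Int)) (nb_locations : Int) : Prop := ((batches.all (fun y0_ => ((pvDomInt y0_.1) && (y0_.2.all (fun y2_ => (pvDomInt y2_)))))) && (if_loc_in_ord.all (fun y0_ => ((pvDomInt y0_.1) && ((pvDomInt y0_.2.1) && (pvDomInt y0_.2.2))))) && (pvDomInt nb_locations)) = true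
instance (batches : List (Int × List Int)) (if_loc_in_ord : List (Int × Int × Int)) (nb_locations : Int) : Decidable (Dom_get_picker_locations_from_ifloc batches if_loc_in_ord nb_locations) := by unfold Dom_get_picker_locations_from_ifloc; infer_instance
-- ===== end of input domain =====

-- B replaces A's per-picker scan over all nb_locations locations (each probing every order via
-- dict.get) by a one-pass order→locations index plus per-picker set unions; equal output
-- (Pre_ only rules out association lists with duplicate dict keys).


-- ===== PORT A =====
-- if_loc_in_ord.get((loc, order), 0): first-match association-list lookup (the dict convention)
def ifoGet (ifo : List (Int × Int × Int)) (loc o : Int) : Int :=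
  match ifo.find? (fun e => e.1 == loc && e.2.1 == o) with
  | some e => e.2.2
  | none => 0

def get_picker_locations_from_ifloc (batches : List (Int × List Int)) (if_loc_in_ord : List (Int × Int × Int)) (nb_locations : Int) : List (Int × List Int) :=
  (batches.foldl (fun (acc : PySem.Dict Int (List Int)) pk =>
      let locs : PySem.Set Int :=
        (PySem.List.pyRange 0 nb_locations 1).foldl (fun s loc =>
          if pk.2.any (fun o => ifoGet if_loc_in_ord loc o == 1) then PySem.Set.add s loc else s)
          PySem.Set.empty
      if locs.isEmpty then acc
      else acc.insert pk.1 (PySem.List.sorted locs (fun x => x) false))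
    PySem.Dict.empty).items

-- ===== PORT B =====
def get_picker_locations_from_ifloc_alt (batches : List (Int × List Int)) (if_loc_in_ord : List (Int × Int × Int)) (nb_locations : Int) : List (Int × List Int) :=
  let index : PySem.Dict Int (PySem.Set Int) :=
    if_loc_in_ord.foldl (fun d e =>
      if e.2.2 == 1 && decide (0 ≤ e.1) && decide (e.1 < nb_locations) then
        d.modify e.2.1 PySem.Set.empty (fun s => PySem.Set.add s e.1)
      else d) PySem.Dict.empty
  (batches.foldl (fun (acc : PySem.Dict Int (List Int)) pk =>
      let locs : PySem.Set Int :=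
        pk.2.foldl (fun s o => PySem.Set.union s (index.getD o PySem.Set.empty)) PySem.Set.empty
      if locs.isEmpty then acc
      else acc.insert pk.1 (PySem.List.sorted locs (fun x => x) false))
    PySem.Dict.empty).items

-- ===== PRECONDITION & SPEC =====
-- Pre_ excludes only association lists with duplicate (location, order) keys: those do not
-- represent any Python dict (dict keys are unique), so A's first-match vs B's full scan there
-- is unspecified.
def Pre_get_picker_locations_from_ifloc (batches : List (Int × List Int)) (if_loc_in_ord : List (Int × Int × Int)) (nb_locations : Int) : Prop :=
  (if_loc_in_ord.map (fun e => (e.1, e.2.1))).Nodup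
instance (batches : List (Int × List Int)) (if_loc_in_ord : List (Int × Int × Int)) (nb_locations : Int) : Decidable (Pre_get_picker_locations_from_ifloc batches if_loc_in_ord nb_locations) := by unfold Pre_get_picker_locations_from_ifloc; infer_instance

def pvWitness_get_picker_locations_from_ifloc : (List (Int × List Int)) × (List (Int × Int × Int)) × Int :=
  ([(1, [2, 3]), (2, [4])], [(0, 2, 1), (1, 3, 1), (0, 4, 0)], 3)

def Spec_get_picker_locations_from_ifloc (batches : List (Int × List Int)) (if_loc_in_ord : List (Int × Int × Int)) (nb_locations : Int) (out : List (Int × List Int)) : Prop := out = get_picker_locations_from_ifloc_alt batches if_loc_in_ord nb_locations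
instance (batches : List (Int × List Int)) (if_loc_in_ord : List (Int × Int × Int)) (nb_locations : Int) (out : List (Int × List Int)) : Decidable (Spec_get_picker_locations_from_ifloc batches if_loc_in_ord nb_locations out) := by unfold Spec_get_picker_locations_from_ifloc; infer_instance

-- ===== CLAIM (what is proved, stated in full; the proofs are below) =====
def Claim_equal_get_picker_locations_from_ifloc : Prop := ∀ (batches : List (Int × List Int)) (if_loc_in_ord : List (Int × Int × Int)) (nb_locations : Int), Dom_get_picker_locations_from_ifloc batches if_loc_in_ord nb_locations → Pre_get_picker_locations_from_ifloc batches if_loc_in_ord nb_locations → Spec_get_picker_locations_from_ifloc batches if_loc_in_ord nb_locations (get_picker_locations_from_ifloc batches if_loc_in_ord nb_locations)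

-- ===== LEMMAS AND PROOFS =====

-- A's location loop is a filter of the (strictly increasing) range
theorem foldl_add_if_eq_filter (p : Int → Bool) :
    ∀ (l : List Int) (acc : PySem.Set Int), l.Nodup → (∀ x ∈ l, x ∉ acc) →
      l.foldl (fun s x => if p x then PySem.Set.add s x else s) acc = acc ++ l.filter p := by
  intro l
  induction l with
  | nil => intro acc _ _; simp
  | cons x xs ih =>
    intro acc hnd hdisj
    rcases List.nodup_cons.mp hnd with ⟨hx, hxs⟩
    simp only [List.foldl_cons, List.filter_cons]
    by_cases hp : p x
    · rw [if_pos hp, if_pos hp, PySem.Set.add_of_not_mem (hdisj x (by simp)),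
        ih (acc ++ [x]) hxs ?_]
      · simp
      · intro y hy
        simp only [List.mem_append, List.mem_singleton, not_or]
        exact ⟨hdisj y (by simp [hy]), fun h => hx (h ▸ hy)⟩
    · rw [if_neg hp, if_neg hp, ih acc hxs (fun y hy => hdisj y (by simp [hy]))]

-- membership in B's index
theorem mem_index_getD (nb : Int) :
    ∀ (l : List (Int × Int × Int)) (d : PySem.Dict Int (PySem.Set Int)) (o y : Int),
      y ∈ (l.foldl (fun d e =>
          if e.2.2 == 1 && decide (0 ≤ e.1) && decide (e.1 < nb) then
            d.modify e.2.1 PySem.Set.empty (fun s => PySem.Set.add s e.1)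
          else d) d).getD o PySem.Set.empty
      ↔ y ∈ d.getD o PySem.Set.empty ∨ ∃ e ∈ l, e.2.2 = 1 ∧ 0 ≤ e.1 ∧ e.1 < nb ∧ e.2.1 = o ∧ y = e.1 := by
  intro l
  induction l with
  | nil => intro d o y; simp
  | cons e es ih =>
    intro d o y
    simp only [List.foldl_cons]
    rw [ih]
    by_cases hc : (e.2.2 == 1 && decide (0 ≤ e.1) && decide (e.1 < nb)) = true
    · rw [if_pos hc]
      simp only [Bool.and_eq_true, beq_iff_eq, decide_eq_true_eq] at hc
      rw [PySem.Dict.getD_modify]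
      by_cases ho : o = e.2.1
      · subst ho
        rw [if_pos rfl, PySem.Set.mem_add]
        constructor
        · rintro ((h | h) | ⟨e', he', h⟩)
          · exact Or.inl h
          · exact Or.inr ⟨e, by simp, hc.1.1, hc.1.2, hc.2, rfl, h⟩
          · exact Or.inr ⟨e', by simp [he'], h⟩
        · rintro (h | ⟨e', he', h1, h2, h3, h4, h5⟩)
          · exact Or.inl (Or.inl h)
          · rcases List.mem_cons.mp he' with he' | he'
            · subst he'; exact Or.inl (Or.inr h5)
            · exact Or.inr ⟨e', he', h1, h2, h3, h4, h5⟩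
      · rw [if_neg ho]
        constructor
        · rintro (h | ⟨e', he', h⟩)
          · exact Or.inl h
          · exact Or.inr ⟨e', by simp [he'], h⟩
        · rintro (h | ⟨e', he', h1, h2, h3, h4, h5⟩)
          · exact Or.inl h
          · rcases List.mem_cons.mp he' with he' | he'
            · exact absurd (he' ▸ h4).symm ho
            · exact Or.inr ⟨e', he', h1, h2, h3, h4, h5⟩
    · rw [if_neg hc]
      simp only [Bool.and_eq_true, beq_iff_eq, decide_eq_true_eq, not_and] at hc
      constructor
      · rintro (h | ⟨e', he', h⟩)
        · exact Or.inl h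
        · exact Or.inr ⟨e', by simp [he'], h⟩
      · rintro (h | ⟨e', he', h1, h2, h3, h4, h5⟩)
        · exact Or.inl h
        · rcases List.mem_cons.mp he' with he' | he'
          · subst he'; exact absurd h3 (hc ⟨h1, h2⟩)
          · exact Or.inr ⟨e', he', h1, h2, h3, h4, h5⟩

theorem mem_foldl_union (index : PySem.Dict Int (PySem.Set Int)) :
    ∀ (orders : List Int) (s : PySem.Set Int) (y : Int),
      y ∈ orders.foldl (fun s o => PySem.Set.union s (index.getD o PySem.Set.empty)) s
      ↔ y ∈ s ∨ ∃ o ∈ orders, y ∈ index.getD o PySem.Set.empty := by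
  intro orders
  induction orders with
  | nil => intro s y; simp
  | cons o os ih =>
    intro s y
    simp only [List.foldl_cons]
    rw [ih, PySem.Set.mem_union]
    constructor
    · rintro ((h | h) | ⟨o', ho', h⟩)
      · exact Or.inl h
      · exact Or.inr ⟨o, by simp, h⟩
      · exact Or.inr ⟨o', by simp [ho'], h⟩
    · rintro (h | ⟨o', ho', h⟩)
      · exact Or.inl (Or.inl h)
      · rcases List.mem_cons.mp ho' with ho' | ho'
        · exact Or.inl (Or.inr (ho' ▸ h))
        · exact Or.inr ⟨o', ho', h⟩

theorem nodup_foldl_union (index : PySem.Dict Int (PySem.Set Int)) :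
    ∀ (orders : List Int) (s : PySem.Set Int), s.Nodup →
      (orders.foldl (fun s o => PySem.Set.union s (index.getD o PySem.Set.empty)) s).Nodup := by
  intro orders
  induction orders with
  | nil => intro s h; exact h
  | cons o os ih =>
    intro s h
    exact ih _ (PySem.Set.nodup_union _ _ h)

-- the first-match lookup hits exactly the (unique) stored entry
theorem ifoGet_eq_one_iff (ifo : List (Int × Int × Int)) (loc o : Int)
    (hnd : (ifo.map (fun e => (e.1, e.2.1))).Nodup) :
    ifoGet ifo loc o = 1 ↔ (loc, o, (1 : Int)) ∈ ifo := by
  unfold ifoGet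
  cases hf : ifo.find? (fun e => e.1 == loc && e.2.1 == o) with
  | none =>
    simp only
    constructor
    · intro h; exact absurd h (by norm_num)
    · intro h
      exact absurd (by simp : ((loc, o, (1:Int)).1 == loc && (loc, o, (1:Int)).2.1 == o) = true)
        (List.find?_eq_none.mp hf _ h)
  | some e =>
    have hmem := List.mem_of_find?_eq_some hf
    have hpred := List.find?_some hf
    simp only [Bool.and_eq_true, beq_iff_eq] at hpred
    simp only
    constructor
    · intro h
      have : e = (loc, o, (1 : Int)) := by
        obtain ⟨e1, e2, e3⟩ := e
        simp only at hpred h ⊢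
        simp [hpred.1, hpred.2, h]
      exact this ▸ hmem
    · intro h
      have := List.inj_on_of_nodup_map hnd hmem h
        (by simp only [hpred.1, hpred.2])
      rw [this]

-- per picker: B's set is a permutation of A's, hence the same sorted list and the same emptiness
theorem per_picker (ifo : List (Int × Int × Int)) (nb : Int) (orders : List Int)
    (hnd : (ifo.map (fun e => (e.1, e.2.1))).Nodup) :
    (PySem.List.sorted
        (orders.foldl (fun s o => PySem.Set.union s
            ((ifo.foldl (fun d e =>
                if e.2.2 == 1 && decide (0 ≤ e.1) && decide (e.1 < nb) then
                  d.modify e.2.1 PySem.Set.empty (fun s => PySem.Set.add s e.1)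
                else d) PySem.Dict.empty).getD o PySem.Set.empty)) PySem.Set.empty)
        (fun x => x) false
      = PySem.List.sorted
        ((PySem.List.pyRange 0 nb 1).foldl (fun s loc =>
            if orders.any (fun o => ifoGet ifo loc o == 1) then PySem.Set.add s loc else s)
          PySem.Set.empty) (fun x => x) false)
    ∧ ((orders.foldl (fun s o => PySem.Set.union s
            ((ifo.foldl (fun d e =>
                if e.2.2 == 1 && decide (0 ≤ e.1) && decide (e.1 < nb) then
                  d.modify e.2.1 PySem.Set.empty (fun s => PySem.Set.add s e.1)
                else d) PySem.Dict.empty).getD o PySem.Set.empty)) PySem.Set.empty).isEmpty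
        = ((PySem.List.pyRange 0 nb 1).foldl (fun s loc =>
            if orders.any (fun o => ifoGet ifo loc o == 1) then PySem.Set.add s loc else s)
          PySem.Set.empty).isEmpty) := by
  have hA : (PySem.List.pyRange 0 nb 1).foldl (fun s loc =>
        if orders.any (fun o => ifoGet ifo loc o == 1) then PySem.Set.add s loc else s)
        PySem.Set.empty
      = (PySem.List.pyRange 0 nb 1).filter
          (fun loc => orders.any (fun o => ifoGet ifo loc o == 1)) := by
    have h := foldl_add_if_eq_filter (fun loc => orders.any (fun o => ifoGet ifo loc o == 1))
      (PySem.List.pyRange 0 nb 1) PySem.Set.empty (PySem.List.nodup_pyRange_one 0 nb)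
      (by intro x _ hx; simp [PySem.Set.empty] at hx)
    simpa using h
  have hpair : ((PySem.List.pyRange 0 nb 1).filter
      (fun loc => orders.any (fun o => ifoGet ifo loc o == 1))).Pairwise (· < ·) :=
    (PySem.List.pairwise_lt_pyRange_one 0 nb).filter _
  have hndA : ((PySem.List.pyRange 0 nb 1).filter
      (fun loc => orders.any (fun o => ifoGet ifo loc o == 1))).Nodup :=
    (PySem.List.nodup_pyRange_one 0 nb).filter _
  have hndB : (orders.foldl (fun s o => PySem.Set.union s
      ((ifo.foldl (fun d e =>
          if e.2.2 == 1 && decide (0 ≤ e.1) && decide (e.1 < nb) then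
            d.modify e.2.1 PySem.Set.empty (fun s => PySem.Set.add s e.1)
          else d) PySem.Dict.empty).getD o PySem.Set.empty)) PySem.Set.empty).Nodup :=
    nodup_foldl_union _ orders PySem.Set.empty (by simp [PySem.Set.empty])
  have hmem : ∀ y, y ∈ (PySem.List.pyRange 0 nb 1).filter
        (fun loc => orders.any (fun o => ifoGet ifo loc o == 1))
      ↔ y ∈ orders.foldl (fun s o => PySem.Set.union s
          ((ifo.foldl (fun d e =>
              if e.2.2 == 1 && decide (0 ≤ e.1) && decide (e.1 < nb) then
                d.modify e.2.1 PySem.Set.empty (fun s => PySem.Set.add s e.1)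
              else d) PySem.Dict.empty).getD o PySem.Set.empty)) PySem.Set.empty := by
    intro y
    rw [List.mem_filter, mem_foldl_union]
    simp only [mem_index_getD, PySem.Dict.getD_empty, PySem.List.mem_pyRange_one,
      List.any_eq_true, beq_iff_eq]
    constructor
    · rintro ⟨⟨hy0, hy1⟩, o, ho, hget⟩
      rw [ifoGet_eq_one_iff ifo y o hnd] at hget
      exact Or.inr ⟨o, ho, Or.inr ⟨(y, o, 1), hget, rfl, hy0, hy1, rfl, rfl⟩⟩
    · rintro (h | ⟨o, ho, (h | ⟨e, he, h1, h2, h3, h4, h5⟩)⟩)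
      · simp [PySem.Set.empty] at h
      · simp [PySem.Set.empty] at h
      · refine ⟨⟨h5 ▸ h2, h5 ▸ h3⟩, o, ho, ?_⟩
        rw [ifoGet_eq_one_iff ifo y o hnd]
        have : e = (y, o, (1 : Int)) := by
          obtain ⟨a, b, c⟩ := e
          simp only at h1 h4 h5 ⊢
          simp [h1, h4, h5]
        exact this ▸ he
  have hperm := (List.perm_ext_iff_of_nodup hndA hndB).mpr hmem
  constructor
  · rw [PySem.List.sorted_eq_of_perm_of_pairwise_lt _ _ _ hperm hpair, hA,
      PySem.List.sorted_eq_of_perm_of_pairwise_lt _ _ _ (List.Perm.refl _) hpair]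
  · rw [hA, Bool.eq_iff_iff]
    simp only [List.isEmpty_iff]
    constructor
    · intro h; rw [h] at hperm; exact hperm.eq_nil
    · intro h; rw [h] at hperm; exact hperm.symm.eq_nil


-- the whole output dict: fold over the pickers, step by step via per_picker
theorem outer_fold (ifo : List (Int × Int × Int)) (nb : Int)
    (hnd : (ifo.map (fun e => (e.1, e.2.1))).Nodup) :
    ∀ (bl : List (Int × List Int)) (acc : PySem.Dict Int (List Int)),
      bl.foldl (fun acc pk =>
          if ((PySem.List.pyRange 0 nb 1).foldl (fun s loc =>
                if pk.2.any (fun o => ifoGet ifo loc o == 1) then PySem.Set.add s loc else s)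
                PySem.Set.empty).isEmpty then acc
          else acc.insert pk.1 (PySem.List.sorted
              ((PySem.List.pyRange 0 nb 1).foldl (fun s loc =>
                if pk.2.any (fun o => ifoGet ifo loc o == 1) then PySem.Set.add s loc else s)
                PySem.Set.empty) (fun x => x) false)) acc
      = bl.foldl (fun acc pk =>
          if (pk.2.foldl (fun s o => PySem.Set.union s
                ((ifo.foldl (fun d e =>
                    if e.2.2 == 1 && decide (0 ≤ e.1) && decide (e.1 < nb) then
                      d.modify e.2.1 PySem.Set.empty (fun s => PySem.Set.add s e.1)
                    else d) PySem.Dict.empty).getD o PySem.Set.empty))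
                PySem.Set.empty).isEmpty then acc
          else acc.insert pk.1 (PySem.List.sorted
              (pk.2.foldl (fun s o => PySem.Set.union s
                ((ifo.foldl (fun d e =>
                    if e.2.2 == 1 && decide (0 ≤ e.1) && decide (e.1 < nb) then
                      d.modify e.2.1 PySem.Set.empty (fun s => PySem.Set.add s e.1)
                    else d) PySem.Dict.empty).getD o PySem.Set.empty))
                PySem.Set.empty) (fun x => x) false)) acc := by
  intro bl
  induction bl with
  | nil => intro acc; rfl
  | cons pk bs ih =>
    intro acc
    simp only [List.foldl_cons]
    rw [← (per_picker ifo nb pk.2 hnd).1, ← (per_picker ifo nb pk.2 hnd).2]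
    exact ih _

-- ===== VERDICT (by name: the statement is the Claim_ definition above) =====
theorem get_picker_locations_from_ifloc_spec : Claim_equal_get_picker_locations_from_ifloc := by
  intro batches ifo nb _ hpre
  unfold Spec_get_picker_locations_from_ifloc
  simp only [get_picker_locations_from_ifloc, get_picker_locations_from_ifloc_alt]
  exact congrArg PySem.Dict.items (outer_fold ifo nb hpre batches PySem.Dict.empty)
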